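-- pv_equiv track=rewrite | github.com/jeygen/interview-prep | data-structures/array/arraySubsets.py | largestSubset2
-- ===== SOURCE A (Python) =====
-- def largestSubset2(arr):
--     arr.sort()
--     n = len(arr)
--     count = 0
--     asum, bsum = 0, 0
--     while (asum <= bsum):
--         bsum = sum(arr[0:n-count])
--         asum = sum(arr[n-count:n])
--         count += 1
--     return arr[n-count+1 : n]
-- ===== SOURCE B (Python) =====
-- def largestSubset2(arr):
--     # single pass with incremental running sums (A re-sums two slices per iteration)
--     arr.sort()
--     asum, bsum = 0, sum(arr)
--     c = 0
--     for x in reversed(arr):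
--         if asum > bsum:
--             break
--         asum += x
--         bsum -= x
--         c += 1
--     return arr[len(arr)-c:]
-- ===== Notes on version B (the rewrite author's own statement) =====
-- stated objective: alternative
-- what changed: Replaces A's per-iteration re-summing of two slices with a single pass over the sorted list keeping incremental running suffix/prefix sums; Pre_ excludes empty and all-zero lists, on which A's while-loop never terminates.
import Mathlib
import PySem

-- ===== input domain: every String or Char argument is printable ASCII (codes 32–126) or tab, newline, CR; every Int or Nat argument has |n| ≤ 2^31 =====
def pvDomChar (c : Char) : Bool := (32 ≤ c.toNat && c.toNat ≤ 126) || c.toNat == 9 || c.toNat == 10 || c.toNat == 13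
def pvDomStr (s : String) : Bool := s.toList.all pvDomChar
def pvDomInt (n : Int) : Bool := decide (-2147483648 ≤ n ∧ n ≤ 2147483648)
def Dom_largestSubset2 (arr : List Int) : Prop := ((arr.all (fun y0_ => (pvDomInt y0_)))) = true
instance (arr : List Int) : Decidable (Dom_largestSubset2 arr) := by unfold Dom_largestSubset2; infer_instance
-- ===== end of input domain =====

-- B replaces A's per-iteration re-summing of two slices with a single pass of
-- incremental running sums after the sort. Both A and B sort arr in place in Python
-- (same observable mutation); the equivalence proved here is about the return value.

-- ===== PORT A =====
-- A's while-loop; fuel only makes the recursion total (under Pre_ it never runs out).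
def largestSubset2Loop (s : List Int) (n : Int) : Int → Int → Int → Nat → Int
  | count, _, _, 0 => count
  | count, asum, bsum, fuel + 1 =>
    if asum ≤ bsum then
      let bsum' := (PySem.List.slice s (some 0) (some (n - count))).sum
      let asum' := (PySem.List.slice s (some (n - count)) (some n)).sum
      largestSubset2Loop s n (count + 1) asum' bsum' fuel
    else count

def largestSubset2 (arr : List Int) : List Int :=
  let s := PySem.List.sorted arr (fun x => x) false
  let n : Int := s.length
  let count := largestSubset2Loop s n 0 0 0 (s.length + 2)
  PySem.List.slice s (some (n - count + 1)) (some n)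

-- ===== PORT B =====
-- B's for-loop over reversed(arr) with running sums and early break.
def largestSubset2AltLoop : List Int → Int → Int → Int → Int
  | [], _, _, c => c
  | x :: rest, asum, bsum, c =>
    if asum > bsum then c
    else largestSubset2AltLoop rest (asum + x) (bsum - x) (c + 1)

def largestSubset2_alt (arr : List Int) : List Int :=
  let s := PySem.List.sorted arr (fun x => x) false
  let c := largestSubset2AltLoop s.reverse 0 s.sum 0
  PySem.List.slice s (some ((s.length : Int) - c)) none

-- ===== PRECONDITION & SPEC =====
-- Pre_ excludes empty and all-zero lists: on exactly those inputs A's while-loop never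
-- terminates (asum and bsum stay 0 forever), so A returns on no excluded input.
def Pre_largestSubset2 (arr : List Int) : Prop := ∃ x ∈ arr, x ≠ 0
instance (arr : List Int) : Decidable (Pre_largestSubset2 arr) := by unfold Pre_largestSubset2; infer_instance
def pvWitness_largestSubset2 : List Int := [1]
def Spec_largestSubset2 (arr : List Int) (out : List Int) : Prop := out = largestSubset2_alt arr
instance (arr : List Int) (out : List Int) : Decidable (Spec_largestSubset2 arr out) := by unfold Spec_largestSubset2; infer_instance

-- ===== CLAIM (what is proved, stated in full; the proofs are below) =====
def Claim_equal_largestSubset2 : Prop := ∀ (arr : List Int), Dom_largestSubset2 arr → Pre_largestSubset2 arr → Spec_largestSubset2 arr (largestSubset2 arr)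

-- ===== LEMMAS AND PROOFS =====

theorem sum_nonpos_of_forall_nonpos (l : List Int) (h : ∀ x ∈ l, x ≤ 0) : l.sum ≤ 0 := by
  induction l with
  | nil => simp
  | cons a t ih =>
    have := h a (by simp)
    have := ih (fun x hx => h x (by simp [hx]))
    simp only [List.sum_cons]; omega

theorem sum_neg_of_mem_neg (l : List Int) (h : ∀ x ∈ l, x ≤ 0) (x : Int) (hx : x ∈ l) (hxn : x ≠ 0) : l.sum < 0 := by
  induction l with
  | nil => simp at hx
  | cons a t ih =>
    have ha := h a (by simp)
    have ht := sum_nonpos_of_forall_nonpos t (fun y hy => h y (by simp [hy]))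
    rcases List.mem_cons.mp hx with rfl | hx'
    · simp only [List.sum_cons]; omega
    · have := ih (fun y hy => h y (by simp [hy])) hx'
      simp only [List.sum_cons]; omega

-- the main loop-alignment lemma: both loops, started at step k with the correct
-- running sums, return the same stop index c (A's count is c + 1).
theorem loops_aligned (s : List Int) :
    ∀ (t : List Int) (k : Nat), t = s.reverse.drop k → k ≤ s.length →
    (s.sum ≤ 0 → ∃ j : Nat, k ≤ j ∧ j < s.length ∧
        (s.take (s.length - j)).sum < (s.drop (s.length - j)).sum) →
    ∃ c : Nat, k ≤ c ∧ c ≤ s.length ∧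
      largestSubset2AltLoop t ((s.drop (s.length - k)).sum) ((s.take (s.length - k)).sum) (k : Int) = (c : Int) ∧
      largestSubset2Loop s (s.length) ((k : Int) + 1) ((s.drop (s.length - k)).sum) ((s.take (s.length - k)).sum) (s.length - k + 1) = (c : Int) + 1 := by
  intro t
  induction t with
  | nil =>
    intro k ht hk hterm
    have hk' : k = s.length := by
      have := congrArg List.length ht
      simp [List.length_drop] at this
      omega
    subst hk'
    refine ⟨s.length, le_refl _, le_refl _, rfl, ?_⟩
    have h1 : s.length - s.length + 1 = 1 := by omega
    rw [h1]
    simp only [largestSubset2Loop, Nat.sub_self, List.drop_zero, List.take_zero, List.sum_nil]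
    have hpos : ¬ (s.sum ≤ (0:Int)) := by
      intro hle
      obtain ⟨j, hj1, hj2, _⟩ := hterm hle
      omega
    rw [if_neg hpos]
  | cons x rest ih =>
    intro k ht hk hterm
    have hklt : k < s.length := by
      have := congrArg List.length ht
      simp [List.length_drop] at this
      omega
    have hkr : k < s.reverse.length := by simpa using hklt
    have hsplit : s.reverse.drop k = s.reverse[k] :: s.reverse.drop (k+1) :=
      List.drop_eq_getElem_cons hkr
    have hcons : x :: rest = s.reverse[k] :: s.reverse.drop (k+1) := ht.trans hsplit
    have hx : x = s.reverse[k] := (List.cons_eq_cons.mp hcons).1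
    have hrest : rest = s.reverse.drop (k+1) := (List.cons_eq_cons.mp hcons).2
    have hm : s.length - (k+1) < s.length := by omega
    have hxval : x = s[s.length - (k+1)]'hm := by
      rw [hx, List.getElem_reverse]; congr 1; omega
    by_cases hc : (s.drop (s.length - k)).sum > (s.take (s.length - k)).sum
    · -- both loops stop here
      refine ⟨k, le_refl _, le_of_lt hklt, ?_, ?_⟩
      · rw [largestSubset2AltLoop, if_pos hc]
      · have h1 : s.length - k + 1 = (s.length - k - 1) + 1 + 1 := by omega
        rw [h1]
        simp only [largestSubset2Loop]
        rw [if_neg (not_le.mpr hc)]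
    · -- both loops continue
      push Not at hc
      -- sum bookkeeping for step k+1
      have hdropstep : s.drop (s.length - (k+1)) = s[s.length - (k+1)]'hm :: s.drop (s.length - k) := by
        have := List.drop_eq_getElem_cons (l := s) (i := s.length - (k+1)) hm
        rw [this]
        congr 2
        omega
      have htakestep : s.take (s.length - k) = s.take (s.length - (k+1)) ++ [s[s.length - (k+1)]'hm] := by
        have h2 : s.length - k = (s.length - (k+1)) + 1 := by omega
        rw [h2, List.take_add_one]
        simp [List.getElem?_eq_getElem hm]
      have hAsum : (s.drop (s.length - k)).sum + x = (s.drop (s.length - (k+1))).sum := by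
        rw [hdropstep, hxval]; simp [List.sum_cons]; ring
      have hBsum : (s.take (s.length - k)).sum - x = (s.take (s.length - (k+1))).sum := by
        have h := congrArg List.sum htakestep
        simp only [List.sum_append, List.sum_cons, List.sum_nil, add_zero] at h
        rw [hxval]; omega
      -- new termination witness
      have hterm' : s.sum ≤ 0 → ∃ j : Nat, k+1 ≤ j ∧ j < s.length ∧
          (s.take (s.length - j)).sum < (s.drop (s.length - j)).sum := by
        intro hle
        obtain ⟨j, hj1, hj2, hj3⟩ := hterm hle
        refine ⟨j, ?_, hj2, hj3⟩
        rcases Nat.eq_or_lt_of_le hj1 with rfl | h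
        · omega
        · omega
      obtain ⟨c, hc1, hc2, hB, hA⟩ := ih (k+1) hrest (by omega) hterm'
      refine ⟨c, by omega, hc2, ?_, ?_⟩
      · rw [largestSubset2AltLoop, if_neg (not_lt.mpr hc)]
        rw [hAsum, hBsum]
        have : ((k : Int) + 1) = ((k + 1 : Nat) : Int) := by push_cast; ring
        rw [this, hB]
      · have h1 : s.length - k + 1 = (s.length - (k+1) + 1) + 1 := by
          clear hterm hterm' hB hA hAsum hBsum; omega
        rw [h1]
        rw [largestSubset2Loop]
        rw [if_pos hc]
        -- the recomputed slices are exactly the step-(k+1) sums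
        have hnk1 : ((s.length : Int) - ((k:Int) + 1)) = ((s.length - (k+1) : Nat) : Int) := by
          omega
        have hslice1 : PySem.List.slice s (some 0) (some ((s.length : Int) - ((k:Int)+1))) = s.take (s.length - (k+1)) := by
          rw [hnk1]
          rw [PySem.List.slice_zero_start, PySem.List.slice_to_natCast]
        have hslice2 : PySem.List.slice s (some ((s.length : Int) - ((k:Int)+1))) (some (s.length : Int)) = s.drop (s.length - (k+1)) := by
          rw [hnk1]
          rw [PySem.List.slice_natCast]
          exact List.take_of_length_le (by simp [List.length_drop])
        rw [hslice1, hslice2]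
        have : ((k : Int) + 1 + 1) = ((k + 1 : Nat) : Int) + 1 := by push_cast; ring
        rw [this, hA]

-- ===== VERDICT (by name: the statement is the Claim_ definition above) =====
theorem largestSubset2_spec : Claim_equal_largestSubset2 := by
  unfold Claim_equal_largestSubset2
  intro arr _ hpre
  unfold Spec_largestSubset2 largestSubset2 largestSubset2_alt
  dsimp only
  obtain ⟨x0, hx0mem, hx0⟩ := hpre
  set s := PySem.List.sorted arr (fun x => x) false with hs
  have hx0s : x0 ∈ s := by
    rw [hs, PySem.List.mem_sorted]; exact hx0mem
  have hne : s ≠ [] := List.ne_nil_of_mem hx0s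
  have hlen : 0 < s.length := List.length_pos_iff.mpr hne
  -- termination witness at k = 0
  have hterm : s.sum ≤ 0 → ∃ j : Nat, 0 ≤ j ∧ j < s.length ∧
      (s.take (s.length - j)).sum < (s.drop (s.length - j)).sum := by
    intro hle
    rcases lt_or_eq_of_le hle with hlt | heq
    · exact ⟨0, le_refl _, hlen, by simpa using hlt⟩
    · -- sum = 0 and a nonzero element: the largest element is positive, take j = 1
      have hpw := PySem.List.sorted_pairwise (xs := arr) (key := fun x => x)
      rw [← hs] at hpw
      have hl1 : s.length - 1 < s.length := by omega
      have hdrop1 : s.drop (s.length - 1) = [s[s.length - 1]'hl1] := by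
        have h := List.drop_eq_getElem_cons (l := s) (i := s.length - 1) hl1
        rw [h, show s.length - 1 + 1 = s.length from by omega, List.drop_length]
      have hsplitsum : (s.take (s.length - 1)).sum + (s.drop (s.length - 1)).sum = s.sum := by
        rw [← List.sum_append, List.take_append_drop]
      have hmono : ∀ y ∈ s, y ≤ s[s.length - 1]'hl1 := by
        intro y hy
        obtain ⟨p, hp, rfl⟩ := List.mem_iff_getElem.mp hy
        rcases Nat.lt_or_ge p (s.length - 1) with hplt | hpge
        · exact List.pairwise_iff_getElem.mp hpw p (s.length - 1) hp hl1 hplt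
        · have hpeq : p = s.length - 1 := by omega
          subst hpeq
          exact le_refl _
      have hlast : 0 < s[s.length - 1]'hl1 := by
        by_contra hle2
        push Not at hle2
        have hall : ∀ y ∈ s, y ≤ 0 := fun y hy => le_trans (hmono y hy) hle2
        have := sum_neg_of_mem_neg s hall x0 hx0s hx0
        omega
      have hn2 : 1 < s.length := by
        by_contra h1
        have hd0 : s.drop (s.length - 1) = s := by
          rw [show s.length - 1 = 0 from by omega, List.drop_zero]
        have hsum1 := congrArg List.sum (hd0.symm.trans hdrop1)
        simp only [List.sum_cons, List.sum_nil, add_zero] at hsum1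
        omega
      refine ⟨1, by omega, hn2, ?_⟩
      rw [hdrop1] at hsplitsum ⊢
      simp only [List.sum_cons, List.sum_nil, add_zero] at hsplitsum ⊢
      omega
  obtain ⟨c, _, hc2, hB, hA⟩ := loops_aligned s (s.reverse) 0 (by simp) (by omega) hterm
  -- unfold the first iteration of A's loop (count = 0, asum = bsum = 0)
  have hfuel : s.length + 2 = (s.length + 1) + 1 := rfl
  have hstep : largestSubset2Loop s (s.length) 0 0 0 (s.length + 2) =
      largestSubset2Loop s (s.length) 1 ((s.drop (s.length - 0)).sum) ((s.take (s.length - 0)).sum) (s.length - 0 + 1) := by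
    rw [hfuel]
    simp only [largestSubset2Loop]
    rw [if_pos (le_refl 0)]
    have hsl1 : PySem.List.slice s (some 0) (some ((s.length : Int) - 0)) = s.take s.length := by
      rw [PySem.List.slice_zero_start]
      have : ((s.length : Int) - 0) = ((s.length : Nat) : Int) := by ring
      rw [this, PySem.List.slice_to_natCast]
    have hsl2 : PySem.List.slice s (some ((s.length : Int) - 0)) (some (s.length : Int)) = s.drop s.length := by
      have : ((s.length : Int) - 0) = ((s.length : Nat) : Int) := by ring
      rw [this, PySem.List.slice_natCast]
      simp
    rw [hsl1, hsl2]
    congr 1 <;> simp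
  have hB0 : largestSubset2AltLoop s.reverse 0 s.sum 0 = (c : Int) := by
    simpa using hB
  have hA0 : largestSubset2Loop s (s.length) 0 0 0 (s.length + 2) = (c : Int) + 1 := by
    rw [hstep]
    have : ((0 : Nat) : Int) + 1 = 1 := by norm_num
    rw [← this]
    exact hA
  rw [hA0, hB0]
  -- the two result slices coincide: both are drop (length - c)
  have hcle : ((s.length : Int) - ((c:Int) + 1) + 1) = ((s.length - c : Nat) : Int) := by omega
  have hcle2 : ((s.length : Int) - (c : Int)) = ((s.length - c : Nat) : Int) := by omega
  rw [hcle, hcle2]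
  rw [PySem.List.slice_natCast, PySem.List.slice_from_natCast]
  exact List.take_of_length_le (by simp [List.length_drop])
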